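-- pv_equiv track=rewrite | github.com/DROwen-dev/C_parser | C_parser.py | phase2_glue_line_continuations
-- ===== SOURCE A (Python) =====
-- def phase2_glue_line_continuations( input_data ):
--
--     input_index = 0
--     state = "NORMAL"
--     output_data = ""
--
--     while input_index < len( input_data ):
--
--         mychar = input_data[ input_index ]
--
--         if state == "NORMAL":
--
--             if mychar == '\\':
--                 state = "LINE_CONTINUATION"
--             else:
--                 output_data = output_data + mychar
--                 #state = "NORMAL"
--
--         else: #state=="LINE_CONTINUATION":
--             if mychar == '\n':
--                 # just eat the backslash and newline sequence by not copying it over to the output stram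
--                 print ("Line Continuation found")
--             else:
--                 #it wasn't a line continuation so put backslash back into the output stream
--                 output_data = output_data + '\\' + mychar
--             state = "NORMAL"
--         input_index += 1
--
--     return output_data
-- ===== SOURCE B (Python) =====
-- def phase2_glue_line_continuations(input_data):
--     out = []
--     i = 0
--     n = len(input_data)
--     while i < n:
--         c = input_data[i]
--         if c == '\\':
--             if i + 1 < n:
--                 nxt = input_data[i + 1]
--                 if nxt == '\n':
--                     print("Line Continuation found")
--                 else:
--                     out.append('\\')
--                     out.append(nxt)
--                 i += 2
--             else:
--                 # trailing lone backslash: nothing follows, it is dropped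
--                 i += 1
--         else:
--             out.append(c)
--             i += 1
--     return ''.join(out)
-- ===== Notes on version B (the rewrite author's own statement) =====
-- stated objective: faster
-- what changed: Replaces the NORMAL/LINE_CONTINUATION state machine with a stateless index-based lookahead loop that consumes backslash pairs with stride 2, and builds the result in a list joined once instead of repeated string concatenation.
import Mathlib
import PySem

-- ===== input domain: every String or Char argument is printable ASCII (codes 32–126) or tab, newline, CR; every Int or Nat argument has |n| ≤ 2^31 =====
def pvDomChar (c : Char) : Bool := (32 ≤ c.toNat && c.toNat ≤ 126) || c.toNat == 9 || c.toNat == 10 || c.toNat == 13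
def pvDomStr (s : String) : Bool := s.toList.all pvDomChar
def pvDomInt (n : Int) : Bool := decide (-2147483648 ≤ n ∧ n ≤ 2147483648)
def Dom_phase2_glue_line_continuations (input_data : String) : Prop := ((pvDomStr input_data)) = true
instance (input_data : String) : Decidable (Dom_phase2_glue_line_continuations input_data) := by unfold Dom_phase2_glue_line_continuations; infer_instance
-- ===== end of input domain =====

-- B replaces A's NORMAL/LINE_CONTINUATION state machine by a stateless stride-2 lookahead loop.
-- Equivalence is about the RETURN value only (the 'print' side effect is not modelled; B performs it identically).

-- ===== PORT A =====
-- A's while loop over input_index with the state variable ("NORMAL" ↦ false, "LINE_CONTINUATION" ↦ true)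
-- and the growing output string, as structural recursion over the remaining characters.
def pvGoA : List Char → Bool → List Char → List Char
  | [], _, out => out
  | c :: rest, state, out =>
    if state = false then
      if c = '\\' then pvGoA rest true out
      else pvGoA rest false (out ++ [c])
    else
      if c = '\n' then pvGoA rest false out
      else pvGoA rest false (out ++ ['\\', c])

def phase2_glue_line_continuations (input_data : String) : String :=
  String.ofList (pvGoA input_data.toList false [])

-- ===== PORT B =====
-- B's index loop with lookahead: a backslash consumes the next char too (stride 2);
-- a trailing lone backslash is dropped; the collected chars are joined at the end.
def pvGoB : List Char → List Char
  | [] => []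
  | [c] => if c = '\\' then [] else [c]
  | c :: d :: rest =>
    if c = '\\' then
      (if d = '\n' then pvGoB rest else '\\' :: d :: pvGoB rest)
    else c :: pvGoB (d :: rest)

def phase2_glue_line_continuations_alt (input_data : String) : String :=
  String.ofList (pvGoB input_data.toList)

-- ===== PRECONDITION & SPEC =====
def Spec_phase2_glue_line_continuations (input_data : String) (out : String) : Prop := out = phase2_glue_line_continuations_alt input_data
instance (input_data : String) (out : String) : Decidable (Spec_phase2_glue_line_continuations input_data out) := by unfold Spec_phase2_glue_line_continuations; infer_instance

-- ===== CLAIM (what is proved, stated in full; the proofs are below) =====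
def Claim_equal_phase2_glue_line_continuations : Prop := ∀ (input_data : String), Dom_phase2_glue_line_continuations input_data → Spec_phase2_glue_line_continuations input_data (phase2_glue_line_continuations input_data)

-- ===== LEMMAS AND PROOFS =====

-- Invariant: in state NORMAL, A continues with out ++ B-of-the-rest; in state LINE_CONTINUATION
-- the pending backslash is exactly a '\\' prefixed to the rest on B's side.
theorem pvGoA_eq_goB (l : List Char) : ∀ (out : List Char),
    pvGoA l false out = out ++ pvGoB l ∧ pvGoA l true out = out ++ pvGoB ('\\' :: l) := by
  induction l with
  | nil => intro out; simp [pvGoA, pvGoB]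
  | cons c rest ih =>
    intro out
    constructor
    · by_cases hc : c = '\\'
      · subst hc; simpa [pvGoA] using (ih out).2
      · cases rest with
        | nil => simp [pvGoA, pvGoB, hc]
        | cons d rest' =>
          rw [pvGoA]
          simp only [if_neg hc, ite_true]
          rw [(ih (out ++ [c])).1]
          simp [pvGoB, hc]
    · by_cases hn : c = '\n'
      · subst hn
        simp only [pvGoA, pvGoB]
        rw [(ih out).1]
        simp
      · rw [pvGoA]
        simp only [if_neg hn, reduceCtorEq, ite_false]
        rw [(ih (out ++ ['\\', c])).1]
        simp [pvGoB, hn]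

-- ===== VERDICT (by name: the statement is the Claim_ definition above) =====
theorem phase2_glue_line_continuations_spec : Claim_equal_phase2_glue_line_continuations := by
  intro s _
  unfold Spec_phase2_glue_line_continuations phase2_glue_line_continuations phase2_glue_line_continuations_alt
  rw [(pvGoA_eq_goB s.toList []).1]
  simp
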